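-- pv_equiv track=rewrite | github.com/sportiz91/react-component-engineer | src/libs/utils/code_analysis.py | build_imported_names_graph
-- ===== SOURCE A (Python) =====
-- from typing import Optional, List, Set, Dict, Tuple
--
-- def build_imported_names_graph(call_graph: Dict[str, Set[str]], imported_names: Set[str], defined_names: Set[str]) -> Dict[str, Set[str]]:
--     imported_names_graph = {}
--
--     def depth_first_seach(func: str, visited: Set[str]) -> Set[str]:
--         if func not in call_graph or func in visited:
--             return set()
--         visited.add(func)
--         called_funcs = call_graph[func] & defined_names
--         result = set(called_funcs)
--         for called_func in called_funcs:
--             result.update(depth_first_seach(called_func, visited))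
--         return result
--
--     for func in imported_names:
--         visited = set()
--         imported_names_graph[func] = depth_first_seach(func, visited)
--
--     return imported_names_graph
-- ===== SOURCE B (Python) =====
-- def build_imported_names_graph(call_graph, imported_names, defined_names):
--     def reachable(start):
--         visited = set()
--         result = set()
--         stack = [start]
--         while stack:
--             func = stack.pop()
--             if func in call_graph and func not in visited:
--                 visited.add(func)
--                 called = [f for f in call_graph[func] if f in defined_names]
--                 result.update(called)
--                 stack.extend(reversed(called))
--         return result
--
--     return {func: reachable(func) for func in imported_names}
-- ===== Notes on version B (the rewrite author's own statement) =====
-- stated objective: alternative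
-- what changed: A's recursive DFS helper that mutates a shared visited set is replaced by an iterative explicit-stack worklist traversal per imported name (no recursion), computing the same reachable sets.
import Mathlib
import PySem

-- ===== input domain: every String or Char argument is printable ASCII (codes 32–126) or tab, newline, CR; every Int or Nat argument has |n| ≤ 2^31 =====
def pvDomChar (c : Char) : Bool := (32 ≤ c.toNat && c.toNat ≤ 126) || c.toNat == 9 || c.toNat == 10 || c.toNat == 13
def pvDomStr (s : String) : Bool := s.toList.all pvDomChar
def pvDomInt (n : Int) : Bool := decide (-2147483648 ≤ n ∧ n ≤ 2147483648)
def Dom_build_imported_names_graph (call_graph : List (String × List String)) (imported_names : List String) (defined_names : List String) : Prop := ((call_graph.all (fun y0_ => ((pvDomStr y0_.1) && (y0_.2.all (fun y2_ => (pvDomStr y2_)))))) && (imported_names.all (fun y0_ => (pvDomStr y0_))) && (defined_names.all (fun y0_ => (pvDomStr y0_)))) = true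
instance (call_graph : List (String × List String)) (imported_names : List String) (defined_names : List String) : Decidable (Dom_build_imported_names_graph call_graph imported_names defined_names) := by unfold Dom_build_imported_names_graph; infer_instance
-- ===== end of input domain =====

-- B replaces A's recursive DFS (shared mutated visited set) by an iterative
-- explicit-stack worklist traversal per imported name; same cost, no recursion.
-- Sets/dicts: Python's set/dict iteration order is not modelled; both ports use
-- insertion order, and outputs are compared as sets / order-insensitive dicts.

-- ===== PORT A =====
-- depth_first_seach: returns (visited, result); visited is the Python set mutated in place.
-- fuel only makes the recursion total; call_graph.length + 1 always suffices (proved below).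
def pvDfsA (call_graph : List (String × List String)) (defined_names : List String) :
    Nat → String → PySem.Set String → PySem.Set String × PySem.Set String
  | 0, _, visited => (visited, PySem.Set.empty)
  | fuel + 1, func, visited =>
    if !(PySem.Dict.contains ⟨call_graph⟩ func) || PySem.Set.contains visited func then
      (visited, PySem.Set.empty)
    else
      let visited1 := PySem.Set.add visited func
      let called_funcs := PySem.Set.inter
        (PySem.Set.ofList (PySem.Dict.getD ⟨call_graph⟩ func [])) defined_names
      called_funcs.foldl
        (fun (p : PySem.Set String × PySem.Set String) called_func =>
          let q := pvDfsA call_graph defined_names fuel called_func p.1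
          (q.1, PySem.Set.union p.2 q.2))
        (visited1, PySem.Set.ofList called_funcs)

def build_imported_names_graph (call_graph : List (String × List String)) (imported_names : List String) (defined_names : List String) : List (String × List String) :=
  (imported_names.foldl
    (fun (g : PySem.Dict String (List String)) func =>
      PySem.Dict.insert g func
        (pvDfsA call_graph defined_names (call_graph.length + 1) func PySem.Set.empty).2)
    PySem.Dict.empty).items

-- ===== PORT B =====
-- helper for the worklist's termination measure: number of not-yet-visited keys
def pvUnvis (call_graph : List (String × List String)) (visited : PySem.Set String) : Nat :=
  ((call_graph.map Prod.fst).filter (fun k => !PySem.Set.contains visited k)).length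

-- visiting an unvisited key strictly shrinks the measure (cited by B's termination proof)
theorem pvUnvis_lt (call_graph : List (String × List String)) (visited : PySem.Set String)
    (func : String) (hk : func ∈ call_graph.map Prod.fst)
    (hv : PySem.Set.contains visited func = false) :
    pvUnvis call_graph (PySem.Set.add visited func) < pvUnvis call_graph visited := by
  unfold pvUnvis
  have hsub : ((call_graph.map Prod.fst).filter
      (fun k => !PySem.Set.contains (PySem.Set.add visited func) k)).Sublist
      ((call_graph.map Prod.fst).filter (fun k => !PySem.Set.contains visited k)) := by
    apply List.monotone_filter_right
    intro a ha
    simp only [Bool.not_eq_eq_eq_not, Bool.not_true, PySem.Set.contains_eq_listContains,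
      List.contains_eq_mem, decide_eq_false_iff_not] at ha ⊢
    intro hmem
    exact ha ((PySem.Set.mem_add visited func a).2 (Or.inl hmem))
  rcases Nat.lt_or_ge
      (((call_graph.map Prod.fst).filter
        (fun k => !PySem.Set.contains (PySem.Set.add visited func) k)).length)
      (((call_graph.map Prod.fst).filter (fun k => !PySem.Set.contains visited k)).length) with h | h
  · exact h
  · exfalso
    have heq := hsub.eq_of_length_le h
    have hin : func ∈ (call_graph.map Prod.fst).filter (fun k => !PySem.Set.contains visited k) := by
      simp only [List.mem_filter, hk, hv, Bool.not_false, and_self]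
    rw [← heq] at hin
    have : PySem.Set.contains (PySem.Set.add visited func) func = false := by
      simpa using (List.mem_filter.1 hin).2
    simp at this

-- reachable's while loop: stack (head = top), visited, result
def pvReachLoop (call_graph : List (String × List String)) (defined_names : List String) :
    List String → PySem.Set String → PySem.Set String → PySem.Set String
  | [], _, result => result
  | func :: rest, visited, result =>
    if PySem.Dict.contains ⟨call_graph⟩ func && !PySem.Set.contains visited func then
      let called := List.filter (fun f => List.contains defined_names f)
        (PySem.Set.ofList (PySem.Dict.getD ⟨call_graph⟩ func []))
      pvReachLoop call_graph defined_names (called ++ rest)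
        (PySem.Set.add visited func) (PySem.Set.update result called)
    else pvReachLoop call_graph defined_names rest visited result
  termination_by stack visited _ => (pvUnvis call_graph visited, stack.length)
  decreasing_by
  · apply Prod.Lex.left
    apply pvUnvis_lt
    · rename_i h
      have hc : PySem.Dict.contains ⟨call_graph⟩ func = true := by
        cases hcc : PySem.Dict.contains (⟨call_graph⟩ : PySem.Dict String (List String)) func <;>
          simp [hcc] at h ⊢
      simp only [PySem.Dict.contains, List.any_eq_true] at hc
      rcases hc with ⟨p, hp, hpe⟩
      exact List.mem_map.2 ⟨p, hp, by simpa using hpe⟩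
    · rename_i h
      cases hvv : PySem.Set.contains visited func
      · rfl
      · simp at h
        exact absurd ((PySem.Set.contains_iff visited func).1 hvv) h.2
  · apply Prod.Lex.right
    simp

def build_imported_names_graph_alt (call_graph : List (String × List String)) (imported_names : List String) (defined_names : List String) : List (String × List String) :=
  (imported_names.foldl
    (fun (g : PySem.Dict String (List String)) func =>
      PySem.Dict.insert g func
        (pvReachLoop call_graph defined_names [func] PySem.Set.empty PySem.Set.empty))
    PySem.Dict.empty).items

-- ===== PRECONDITION & SPEC =====
def Spec_build_imported_names_graph (call_graph : List (String × List String)) (imported_names : List String) (defined_names : List String) (out : List (String × List String)) : Prop := out = build_imported_names_graph_alt call_graph imported_names defined_names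
instance (call_graph : List (String × List String)) (imported_names : List String) (defined_names : List String) (out : List (String × List String)) : Decidable (Spec_build_imported_names_graph call_graph imported_names defined_names out) := by unfold Spec_build_imported_names_graph; infer_instance

-- ===== CLAIM (what is proved, stated in full; the proofs are below) =====
def Claim_equal_build_imported_names_graph : Prop := ∀ (call_graph : List (String × List String)) (imported_names : List String) (defined_names : List String), Dom_build_imported_names_graph call_graph imported_names defined_names → Spec_build_imported_names_graph call_graph imported_names defined_names (build_imported_names_graph call_graph imported_names defined_names)

-- ===== LEMMAS AND PROOFS =====

theorem pv_update_add {α : Type} [BEq α] [LawfulBEq α] (s a : PySem.Set α) (x : α) :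
    PySem.Set.update s (PySem.Set.add a x) = PySem.Set.add (PySem.Set.update s a) x := by
  by_cases h : PySem.Set.contains a x = true
  · have hxa : x ∈ a := (PySem.Set.contains_iff a x).1 h
    simp [PySem.Set.add, hxa]
  · have hxa : x ∉ a := by simpa using h
    have h1 : PySem.Set.add a x = a ++ [x] := by
      simp [PySem.Set.add, hxa]
    rw [h1]
    show List.foldl PySem.Set.add s (a ++ [x]) = _
    rw [List.foldl_append]
    rfl

theorem pv_update_update {α : Type} [BEq α] [LawfulBEq α] (s a : PySem.Set α) (b : List α) :
    PySem.Set.update s (PySem.Set.update a b)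
      = PySem.Set.update (PySem.Set.update s a) b := by
  induction b generalizing a with
  | nil => rfl
  | cons x b ih =>
    show PySem.Set.update s (PySem.Set.update (PySem.Set.add a x) b) = _
    rw [ih (PySem.Set.add a x), pv_update_add]
    rfl

theorem pv_update_ofList {α : Type} [BEq α] [LawfulBEq α] (s : PySem.Set α) (b : List α) :
    PySem.Set.update s (PySem.Set.ofList b) = PySem.Set.update s b :=
  pv_update_update s [] b

-- visited only grows through A's DFS
theorem pv_dfs_mono (cg : List (String × List String)) (dn : List String) :
    ∀ (fuel : Nat) (func : String) (visited : PySem.Set String) (x : String),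
      x ∈ visited → x ∈ (pvDfsA cg dn fuel func visited).1 := by
  intro fuel
  induction fuel with
  | zero => intro func visited x hx; simpa [pvDfsA] using hx
  | succ n ih =>
    intro func visited x hx
    rw [pvDfsA]
    dsimp only
    split
    · exact hx
    · have hfold : ∀ (cs : List String) (p : PySem.Set String × PySem.Set String), x ∈ p.1 →
          x ∈ (cs.foldl (fun p called_func =>
              ((pvDfsA cg dn n called_func p.1).1,
                PySem.Set.union p.2 (pvDfsA cg dn n called_func p.1).2)) p).1 := by
        intro cs
        induction cs with
        | nil => intro p h; exact h
        | cons c cs ihc => intro p h; exact ihc _ (ih c p.1 x h)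
      exact hfold _ _ ((PySem.Set.mem_add visited func x).2 (Or.inl hx))

-- A's result set has no duplicates
theorem pv_dfs_nodup (cg : List (String × List String)) (dn : List String) :
    ∀ (fuel : Nat) (func : String) (visited : PySem.Set String),
      ((pvDfsA cg dn fuel func visited).2).Nodup := by
  intro fuel
  induction fuel with
  | zero => intro func visited; simp [pvDfsA, PySem.Set.empty]
  | succ n ih =>
    intro func visited
    rw [pvDfsA]
    dsimp only
    split
    · simp [PySem.Set.empty]
    · have hfold : ∀ (cs : List String) (p : PySem.Set String × PySem.Set String), p.2.Nodup →
          ((cs.foldl (fun p called_func =>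
              ((pvDfsA cg dn n called_func p.1).1,
                PySem.Set.union p.2 (pvDfsA cg dn n called_func p.1).2)) p).2).Nodup := by
        intro cs
        induction cs with
        | nil => intro p h; exact h
        | cons c cs ihc => intro p h; exact ihc _ (PySem.Set.nodup_union _ _ h)
      exact hfold _ _ (PySem.Set.nodup_ofList _)

theorem pv_unvis_mono (cg : List (String × List String)) (v v' : PySem.Set String)
    (h : ∀ x, x ∈ v → x ∈ v') : pvUnvis cg v' ≤ pvUnvis cg v := by
  unfold pvUnvis
  apply List.Sublist.length_le
  apply List.monotone_filter_right
  intro a ha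
  simp only [Bool.not_eq_eq_eq_not, Bool.not_true, PySem.Set.contains_eq_listContains,
    List.contains_eq_mem, decide_eq_false_iff_not] at ha ⊢
  intro hmem
  exact ha (h a hmem)

-- one-step unfolding of B's worklist loop
theorem pvReachLoop_cons (cg : List (String × List String)) (dn : List String)
    (func : String) (rest : List String) (visited result : PySem.Set String) :
    pvReachLoop cg dn (func :: rest) visited result =
      if PySem.Dict.contains ⟨cg⟩ func && !PySem.Set.contains visited func then
        pvReachLoop cg dn
          ((List.filter (fun f => List.contains dn f)
              (PySem.Set.ofList (PySem.Dict.getD ⟨cg⟩ func []))) ++ rest)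
          (PySem.Set.add visited func)
          (PySem.Set.update result
            (List.filter (fun f => List.contains dn f)
              (PySem.Set.ofList (PySem.Dict.getD ⟨cg⟩ func []))))
      else pvReachLoop cg dn rest visited result := by
  rw [pvReachLoop]

-- simulation: running B's loop on one more stack entry = one call of A's DFS
theorem pv_sim (cg : List (String × List String)) (dn : List String) :
    ∀ (fuel : Nat) (func : String) (stack : List String)
      (visited result : PySem.Set String), pvUnvis cg visited < fuel →
      pvReachLoop cg dn (func :: stack) visited result
        = pvReachLoop cg dn stack (pvDfsA cg dn fuel func visited).1
            (PySem.Set.update result (pvDfsA cg dn fuel func visited).2) := by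
  intro fuel
  induction fuel with
  | zero => intro func stack visited result h; exact absurd h (Nat.not_lt_zero _)
  | succ n ih =>
    intro func stack visited result h
    rw [pvDfsA]
    dsimp only
    by_cases hg : (PySem.Dict.contains ⟨cg⟩ func && !PySem.Set.contains visited func) = true
    · -- expand
      have hg2 := hg
      rw [Bool.and_eq_true] at hg2
      have hc : PySem.Dict.contains (⟨cg⟩ : PySem.Dict String (List String)) func = true := hg2.1
      have hv : PySem.Set.contains visited func = false := by
        have h2 := hg2.2
        cases hvv : PySem.Set.contains visited func
        · rfl
        · rw [hvv] at h2; exact absurd h2 (by simp)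
      have hnot : (!(PySem.Dict.contains (⟨cg⟩ : PySem.Dict String (List String)) func)
          || PySem.Set.contains visited func) = false := by
        rw [hc, hv]; rfl
      rw [hnot]
      simp only [Bool.false_eq_true, if_false]
      -- the two ports compute the same filtered child list
      have hcalled : PySem.Set.inter
            (PySem.Set.ofList (PySem.Dict.getD ⟨cg⟩ func [])) dn
          = List.filter (fun f => List.contains dn f)
              (PySem.Set.ofList (PySem.Dict.getD ⟨cg⟩ func [])) := by
        simp [PySem.Set.inter]
      set called := List.filter (fun f => List.contains dn f)
        (PySem.Set.ofList (PySem.Dict.getD ⟨cg⟩ func [])) with hcdef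
      rw [hcalled]
      -- measure strictly decreased
      have hkey : func ∈ cg.map Prod.fst := by
        simp only [PySem.Dict.contains, List.any_eq_true] at hc
        rcases hc with ⟨p, hp, hpe⟩
        exact List.mem_map.2 ⟨p, hp, by simpa using hpe⟩
      have hlt : pvUnvis cg (PySem.Set.add visited func) < n := by
        have h1 := pvUnvis_lt cg visited func hkey hv
        omega
      -- the fold of A = continued loop of B
      have hfold : ∀ (cs rest : List String) (visited racc result : PySem.Set String),
          pvUnvis cg visited < n →
          pvReachLoop cg dn (cs ++ rest) visited (PySem.Set.update result racc)
            = pvReachLoop cg dn rest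
                (cs.foldl (fun p called_func =>
                  ((pvDfsA cg dn n called_func p.1).1,
                    PySem.Set.union p.2 (pvDfsA cg dn n called_func p.1).2)) (visited, racc)).1
                (PySem.Set.update result
                  (cs.foldl (fun p called_func =>
                    ((pvDfsA cg dn n called_func p.1).1,
                      PySem.Set.union p.2 (pvDfsA cg dn n called_func p.1).2)) (visited, racc)).2) := by
        intro cs
        induction cs with
        | nil => intro rest visited racc result _; rfl
        | cons c cs ihc =>
          intro rest visited racc result hlt2
          have hstep := ih c (cs ++ rest) visited (PySem.Set.update result racc) hlt2
          rw [List.cons_append, hstep, ← pv_update_update]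
          have hmono : pvUnvis cg (pvDfsA cg dn n c visited).1 ≤ pvUnvis cg visited :=
            pv_unvis_mono cg _ _ (pv_dfs_mono cg dn n c visited)
          have := ihc rest (pvDfsA cg dn n c visited).1
            (PySem.Set.update racc (pvDfsA cg dn n c visited).2) result (by omega)
          rw [this]
          rfl
      rw [pvReachLoop_cons, if_pos hg, ← hcdef]
      have hres : PySem.Set.update result called
          = PySem.Set.update result (PySem.Set.ofList called) := (pv_update_ofList result called).symm
      rw [hres]
      exact hfold called stack (PySem.Set.add visited func) (PySem.Set.ofList called) result hlt
    · -- no expansion: A returns the empty set, B skips the head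
      have hnot : (!(PySem.Dict.contains (⟨cg⟩ : PySem.Dict String (List String)) func)
          || PySem.Set.contains visited func) = true := by
        cases h1 : PySem.Dict.contains (⟨cg⟩ : PySem.Dict String (List String)) func <;>
          cases h2 : PySem.Set.contains visited func <;> simp_all
      rw [hnot]
      simp only [if_true]
      rw [pvReachLoop_cons, if_neg hg]
      rfl

-- per imported name: A's DFS result = B's worklist result
theorem pv_pointwise (cg : List (String × List String)) (dn : List String) (f : String) :
    (pvDfsA cg dn (cg.length + 1) f PySem.Set.empty).2
      = pvReachLoop cg dn [f] PySem.Set.empty PySem.Set.empty := by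
  have hu : pvUnvis cg PySem.Set.empty < cg.length + 1 := by
    unfold pvUnvis
    have : (List.filter (fun k => !PySem.Set.contains PySem.Set.empty k) (cg.map Prod.fst))
        = cg.map Prod.fst := by
      apply List.filter_eq_self.2
      intro a _
      rfl
    rw [this, List.length_map]
    omega
  have hnil : ∀ (v r : PySem.Set String), pvReachLoop cg dn [] v r = r := by
    intro v r; rw [pvReachLoop]
  have := pv_sim cg dn (cg.length + 1) f [] PySem.Set.empty PySem.Set.empty hu
  rw [this, hnil]
  have hof : PySem.Set.update PySem.Set.empty
      (pvDfsA cg dn (cg.length + 1) f PySem.Set.empty).2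
      = PySem.Set.ofList (pvDfsA cg dn (cg.length + 1) f PySem.Set.empty).2 := rfl
  rw [hof, PySem.Set.ofList_eq_self_of_nodup _ (pv_dfs_nodup cg dn _ f _)]

-- ===== VERDICT (by name: the statement is the Claim_ definition above) =====
theorem build_imported_names_graph_spec : Claim_equal_build_imported_names_graph := by
  intro cg imp dn _
  unfold Spec_build_imported_names_graph build_imported_names_graph build_imported_names_graph_alt
  have hfun : (fun (g : PySem.Dict String (List String)) func =>
        PySem.Dict.insert g func
          (pvDfsA cg dn (cg.length + 1) func PySem.Set.empty).2)
      = (fun (g : PySem.Dict String (List String)) func =>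
        PySem.Dict.insert g func
          (pvReachLoop cg dn [func] PySem.Set.empty PySem.Set.empty)) := by
    funext g f
    rw [pv_pointwise]
  rw [hfun]
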